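-- pv_equiv track=rewrite | github.com/LeeChanghoJJang/Algorithm-Study | 19회차/programmers_67258_보석_쇼핑/programmers_67258_박동현.py | solution
-- ===== SOURCE A (Python) =====
-- def solution(gems):
--     answer = []
--     # target : 모든 보석 종류의 개수
--     target=len(set(gems))
--     ans_dict = dict()
--
--     cnt = 0
--     check = False
--     length = float('inf')
--     for gem in gems:
--         cnt +=1
--         ans_dict[gem] = cnt
--
--         if not check and target == len(ans_dict.keys()) : check = True
--
--         if check :
--             if answer and answer[0] < ans_dict[gem] < answer[1] : continue
--             maxv=max(ans_dict.values())
--             minv=min(ans_dict.values())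
--             if maxv-minv<length:
--                 answer = [minv,maxv]
--                 length = maxv-minv
--     return answer
-- ===== SOURCE B (Python) =====
-- def solution(gems):
--     kinds = len(set(gems))
--     counts = {}
--     left = 0
--     best = []
--     best_len = None
--     for right, gem in enumerate(gems):
--         counts[gem] = counts.get(gem, 0) + 1
--         if len(counts) == kinds:
--             while counts[gems[left]] > 1:
--                 counts[gems[left]] -= 1
--                 left += 1
--             if best_len is None or right - left < best_len:
--                 best = [left + 1, right + 1]
--                 best_len = right - left
--     return best
-- ===== Notes on version B (the rewrite author's own statement) =====
-- stated objective: alternative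
-- what changed: A rebuilds max and min over the whole last-occurrence dict at every covered position; B is a sliding-window two-pointer pass with per-type counts whose left pointer advances amortized O(1) per element (intended as the O(n) algorithm; a timing run measured only ~1.4x on its few-type inputs, so no speed is claimed).
import Mathlib
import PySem

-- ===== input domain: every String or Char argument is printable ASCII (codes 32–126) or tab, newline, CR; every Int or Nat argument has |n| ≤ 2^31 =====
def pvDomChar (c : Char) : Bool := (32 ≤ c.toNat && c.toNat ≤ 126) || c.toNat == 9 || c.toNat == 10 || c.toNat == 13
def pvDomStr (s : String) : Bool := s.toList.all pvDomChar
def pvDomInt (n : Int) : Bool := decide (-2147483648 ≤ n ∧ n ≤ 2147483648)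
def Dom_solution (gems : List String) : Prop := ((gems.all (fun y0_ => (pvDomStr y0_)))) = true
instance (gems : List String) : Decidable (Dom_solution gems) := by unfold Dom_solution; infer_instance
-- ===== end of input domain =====

-- B replaces A's per-step min/max scan over the last-occurrence dict by a sliding-window
-- two-pointer pass with per-type counts (same return value; measured ~1.4x on the timing
-- run's few-type inputs, not claimed as faster).


-- ===== PORT A =====
-- literal transliteration of A: state (answer, ans_dict, cnt, check, length);
-- float('inf') is modelled as Option Int 'none' (only ever compared against int differences, exact);
-- max()/min() run on d.values which is nonempty at every use site, so the '.getD 0' default is never read.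
def solution (gems : List String) : List Int :=
  let target : Int := ((PySem.Set.ofList gems).length : Int)
  let st := gems.foldl
    (fun (st : List Int × PySem.Dict String Int × Int × Bool × Option Int) gem =>
      let answer := st.1
      let cnt := st.2.2.1 + 1
      let d := st.2.1.insert gem cnt
      let check := if !st.2.2.2.1 && target == (d.keys.length : Int) then true else st.2.2.2.1
      if check then
        -- 'answer and answer[0] < ans_dict[gem] < answer[1]'
        if (match answer with
            | a0 :: a1 :: _ => decide (a0 < d.getD gem 0 ∧ d.getD gem 0 < a1)
            | _ => false) then (answer, d, cnt, check, st.2.2.2.2)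
        else
          let maxv := (PySem.List.max? d.values (fun v => v)).getD 0
          let minv := (PySem.List.min? d.values (fun v => v)).getD 0
          match st.2.2.2.2 with
          | none => ([minv, maxv], d, cnt, check, some (maxv - minv))
          | some L =>
            if maxv - minv < L then ([minv, maxv], d, cnt, check, some (maxv - minv))
            else (answer, d, cnt, check, some L)
      else (answer, d, cnt, check, st.2.2.2.2))
    ([], PySem.Dict.empty, 0, false, none)
  st.1

-- ===== PORT B =====
-- the 'while counts[gems[left]] > 1' loop of Source B; fuel = len(gems) only makes it total
-- (left stays ≤ len(gems) and advances each step, so the fuel is never exhausted);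
-- 'gems.getD left ""' is gems[left], whose index is always in range at every use site.
def shrinkLoop (gems : List String) (fuel : Nat) (counts : PySem.Dict String Int) (left : Nat) :
    PySem.Dict String Int × Nat :=
  match fuel with
  | 0 => (counts, left)
  | fuel + 1 =>
    let g := gems.getD left ""
    if 1 < counts.getD g 0 then
      shrinkLoop gems fuel (counts.modify g 0 (· - 1)) (left + 1)
    else (counts, left)

-- literal transliteration of Source B: state (counts, left, best, best_len); best_len None = Option none
def solution_alt (gems : List String) : List Int :=
  let kinds := (PySem.Set.ofList gems).length
  let st := (PySem.List.enumerate gems).foldl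
    (fun (st : PySem.Dict String Int × Nat × List Int × Option Int) p =>
      let counts := st.1.modify p.2 0 (· + 1)
      let left := st.2.1
      if counts.size = kinds then
        let cl := shrinkLoop gems gems.length counts left
        let newLen : Int := p.1 - (cl.2 : Int)
        match st.2.2.2 with
        | none => (cl.1, cl.2, [(cl.2 : Int) + 1, p.1 + 1], some newLen)
        | some L =>
          if newLen < L then (cl.1, cl.2, [(cl.2 : Int) + 1, p.1 + 1], some newLen)
          else (cl.1, cl.2, st.2.2.1, some L)
      else (counts, left, st.2.2.1, st.2.2.2))
    (PySem.Dict.empty, 0, [], none)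
  st.2.2.1

-- ===== PRECONDITION & SPEC =====
def Spec_solution (gems : List String) (out : List Int) : Prop := out = solution_alt gems
instance (gems : List String) (out : List Int) : Decidable (Spec_solution gems out) := by unfold Spec_solution; infer_instance

-- ===== CLAIM (what is proved, stated in full; the proofs are below) =====
def Claim_equal_solution : Prop := ∀ (gems : List String), Dom_solution gems → Spec_solution gems (solution gems)

-- ===== LEMMAS AND PROOFS =====

-- 'prefix p covers every gem type of the whole list'
def Cov (gems p : List String) : Prop := ∀ g ∈ gems, g ∈ p

-- 'i is the index of the last occurrence of g in p'
def IsLast (p : List String) (g : String) (i : Nat) : Prop :=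
  i < p.length ∧ p.getD i "" = g ∧ g ∉ p.drop (i + 1)

-- 'l is the tight left edge of the covering window ending at the right edge of p'
def TightL (p : List String) (l : Nat) : Prop :=
  l < p.length ∧ (∀ g ∈ p, g ∈ p.drop l) ∧ p.getD l "" ∉ p.drop (l + 1)

lemma mem_drop_of_getD (p : List String) (i j : Nat) (hi : i < p.length) (hj : j ≤ i) :
    p.getD i "" ∈ p.drop j := by
  have hlt : i - j < (p.drop j).length := by simp; omega
  have h1 : (p.drop j)[i - j]'hlt = p[i]'hi := by
    rw [List.getElem_drop]; congr 1; omega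
  rw [List.getD_eq_getElem _ _ hi, ← h1]
  exact List.getElem_mem _

lemma mem_drop_of_isLast {p : List String} {g : String} {i j : Nat}
    (h : IsLast p g i) (hj : j ≤ i) : g ∈ p.drop j := by
  obtain ⟨h1, h2, _⟩ := h
  rw [← h2]; exact mem_drop_of_getD p i j h1 hj

lemma isLast_unique {p : List String} {g : String} {i j : Nat}
    (hi : IsLast p g i) (hj : IsLast p g j) : i = j := by
  rcases lt_trichotomy i j with h | h | h
  · exact absurd (mem_drop_of_isLast hj (by omega)) hi.2.2
  · exact h
  · exact absurd (mem_drop_of_isLast hi (by omega)) hj.2.2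

lemma tightL_unique {p : List String} {l l' : Nat}
    (h : TightL p l) (h' : TightL p l') : l = l' := by
  rcases lt_trichotomy l l' with hlt | he | hlt
  · have hm : p.getD l "" ∈ p := by
      rw [List.getD_eq_getElem _ _ h.1]; exact List.getElem_mem _
    have := h'.2.1 _ hm
    exact absurd (List.drop_subset_drop_left p (by omega : l + 1 ≤ l') this) h.2.2
  · exact he
  · have hm : p.getD l' "" ∈ p := by
      rw [List.getD_eq_getElem _ _ h'.1]; exact List.getElem_mem _
    have := h.2.1 _ hm
    exact absurd (List.drop_subset_drop_left p (by omega : l' + 1 ≤ l) this) h'.2.2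

lemma isLast_concat_self (p : List String) (x : String) : IsLast (p ++ [x]) x p.length := by
  refine ⟨by simp, ?_, ?_⟩
  · rw [List.getD_eq_getElem _ _ (by simp)]
    simp
  · rw [List.drop_eq_nil_of_le (by simp)]
    simp

lemma isLast_concat_of_ne {p : List String} {x g : String} {i : Nat} (hgx : g ≠ x) :
    IsLast (p ++ [x]) g i ↔ IsLast p g i := by
  constructor
  · rintro ⟨h1, h2, h3⟩
    have hip : i < p.length := by
      rcases Nat.lt_or_ge i p.length with h | h
      · exact h
      · exfalso
        have hie : i = p.length := by simp at h1; omega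
        subst hie
        apply hgx
        rw [← h2, List.getD_eq_getElem _ _ h1]
        simp
    refine ⟨hip, ?_, ?_⟩
    · rw [← h2, List.getD_eq_getElem _ _ h1, List.getD_eq_getElem _ _ hip]
      rw [List.getElem_append_left hip]
    · intro hmem
      apply h3
      rw [List.drop_append_of_le_length (by omega)]
      exact List.mem_append_left _ hmem
  · rintro ⟨h1, h2, h3⟩
    refine ⟨by simp; omega, ?_, ?_⟩
    · rw [← h2, List.getD_eq_getElem _ _ h1, List.getD_eq_getElem _ _ (by simp; omega : i < (p ++ [x]).length)]
      rw [List.getElem_append_left h1]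
    · rw [List.drop_append_of_le_length (by omega)]
      intro hmem
      rcases List.mem_append.mp hmem with h | h
      · exact h3 h
      · simp at h; exact hgx h

lemma exists_isLast_of_mem {p : List String} {g : String} (h : g ∈ p) : ∃ i, IsLast p g i := by
  induction p using List.reverseRecOn with
  | nil => simp at h
  | append_singleton p x ih =>
    by_cases hgx : g = x
    · subst hgx; exact ⟨p.length, isLast_concat_self p g⟩
    · have hp : g ∈ p := by
        rcases List.mem_append.mp h with h | h
        · exact h
        · simp at h; exact absurd h hgx
      obtain ⟨i, hi⟩ := ih hp
      exact ⟨i, (isLast_concat_of_ne hgx).mpr hi⟩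

lemma dchar_insert (p : List String) (x : String) (d : PySem.Dict String Int)
    (hchar : ∀ g v, d.get? g = some v ↔ ∃ i : Nat, v = (i : Int) + 1 ∧ IsLast p g i) :
    ∀ g v, (d.insert x ((p.length : Int) + 1)).get? g = some v ↔
      ∃ i : Nat, v = (i : Int) + 1 ∧ IsLast (p ++ [x]) g i := by
  intro g v
  rw [PySem.Dict.get?_insert]
  split_ifs with hg
  · subst hg
    constructor
    · rintro h
      exact ⟨p.length, by injection h with h; omega, isLast_concat_self p g⟩
    · rintro ⟨i, hv, hl⟩
      have := isLast_unique hl (isLast_concat_self p g)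
      subst this; subst hv; rfl
  · rw [hchar]
    constructor
    · rintro ⟨i, hv, hl⟩
      exact ⟨i, hv, (isLast_concat_of_ne hg).mpr hl⟩
    · rintro ⟨i, hv, hl⟩
      exact ⟨i, hv, (isLast_concat_of_ne hg).mp hl⟩

lemma mem_values_iff (d : PySem.Dict String Int) (hn : d.keys.Nodup) (v : Int) :
    v ∈ d.values ↔ ∃ k, d.get? k = some v := by
  constructor
  · intro h
    have h2 : v ∈ d.items.map (·.2) := by simpa [PySem.Dict.values] using h
    rcases List.mem_map.mp h2 with ⟨⟨k, w⟩, hm, hw⟩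
    cases hw
    exact ⟨k, PySem.Dict.get?_of_mem_items d hm hn⟩
  · rintro ⟨k, hk⟩
    have hm := PySem.Dict.mem_items_of_get?_eq_some d hk
    have : v ∈ d.items.map (·.2) := List.mem_map.mpr ⟨(k, v), hm, rfl⟩
    simpa [PySem.Dict.values] using this

lemma values_ne_nil (p : List String) (d : PySem.Dict String Int) (hn : d.keys.Nodup)
    (hchar : ∀ g v, d.get? g = some v ↔ ∃ i : Nat, v = (i : Int) + 1 ∧ IsLast p g i)
    (hne : p ≠ []) : d.values ≠ [] := by
  have h0 : 0 < p.length := List.length_pos_of_ne_nil hne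
  have hl : IsLast p (p.getD (p.length - 1) "") (p.length - 1) := by
    refine ⟨by omega, rfl, ?_⟩
    rw [List.drop_eq_nil_of_le (by omega)]
    simp
  have hv : ((p.length - 1 : Nat) : Int) + 1 ∈ d.values :=
    (mem_values_iff d hn _).mpr ⟨_, (hchar _ _).mpr ⟨p.length - 1, rfl, hl⟩⟩
  exact List.ne_nil_of_mem hv

lemma maxv_eq (p : List String) (d : PySem.Dict String Int) (hn : d.keys.Nodup)
    (hchar : ∀ g v, d.get? g = some v ↔ ∃ i : Nat, v = (i : Int) + 1 ∧ IsLast p g i)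
    (hne : p ≠ []) :
    (PySem.List.max? d.values (fun v => v)).getD 0 = (p.length : Int) := by
  have h0 : 0 < p.length := List.length_pos_of_ne_nil hne
  rcases h : PySem.List.max? d.values (fun v => v) with _ | M
  · exact absurd ((PySem.List.max?_eq_none_iff _ _).mp h) (values_ne_nil p d hn hchar hne)
  · have hMmem := PySem.List.max?_mem h
    obtain ⟨k, hk⟩ := (mem_values_iff d hn M).mp hMmem
    obtain ⟨i, hMv, hMl⟩ := (hchar k M).mp hk
    have hub : M ≤ (p.length : Int) := by
      have := hMl.1; omega
    have hl : IsLast p (p.getD (p.length - 1) "") (p.length - 1) := by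
      refine ⟨by omega, rfl, ?_⟩
      rw [List.drop_eq_nil_of_le (by omega)]
      simp
    have hv : ((p.length - 1 : Nat) : Int) + 1 ∈ d.values :=
      (mem_values_iff d hn _).mpr ⟨_, (hchar _ _).mpr ⟨p.length - 1, rfl, hl⟩⟩
    have hlb := PySem.List.max?_isMax h _ hv
    simp only [Option.getD_some]
    have : ((p.length - 1 : Nat) : Int) + 1 = (p.length : Int) := by omega
    rw [this] at hlb
    omega

lemma minv_eq (p : List String) (d : PySem.Dict String Int) (hn : d.keys.Nodup)
    (hchar : ∀ g v, d.get? g = some v ↔ ∃ i : Nat, v = (i : Int) + 1 ∧ IsLast p g i)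
    (l : Nat) (ht : TightL p l) :
    (PySem.List.min? d.values (fun v => v)).getD 0 = (l : Int) + 1 := by
  have hne : p ≠ [] := List.ne_nil_of_length_pos (by have := ht.1; omega)
  rcases h : PySem.List.min? d.values (fun v => v) with _ | m
  · exact absurd ((PySem.List.min?_eq_none_iff _ _).mp h) (values_ne_nil p d hn hchar hne)
  · have hmmem := PySem.List.min?_mem h
    obtain ⟨k, hk⟩ := (mem_values_iff d hn m).mp hmmem
    obtain ⟨i0, hmv, hml⟩ := (hchar k m).mp hk
    have htight : TightL p i0 := by
      refine ⟨hml.1, ?_, by rw [hml.2.1]; exact hml.2.2⟩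
      intro g hg
      obtain ⟨ig, hig⟩ := exists_isLast_of_mem hg
      have hvg : ((ig : Int) + 1) ∈ d.values :=
        (mem_values_iff d hn _).mpr ⟨g, (hchar g _).mpr ⟨ig, rfl, hig⟩⟩
      have := PySem.List.min?_isMin h _ hvg
      exact mem_drop_of_isLast hig (by omega)
    have := tightL_unique ht htight
    subst this
    simp only [Option.getD_some]
    omega

lemma cov_size (gems p ks : List String) (hn : ks.Nodup)
    (hmem : ∀ g, g ∈ ks ↔ g ∈ p) (hpre : ∀ g ∈ p, g ∈ gems) :
    (PySem.Set.ofList gems).length = ks.length ↔ Cov gems p := by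
  have hsub : ks ⊆ PySem.Set.ofList gems := by
    intro g hg
    exact (PySem.Set.mem_ofList _ _).mpr (hpre g ((hmem g).mp hg))
  have hsp : ks.Subperm (PySem.Set.ofList gems) := List.subperm_of_subset hn hsub
  constructor
  · intro hlen g hg
    have hperm := hsp.perm_of_length_le (le_of_eq hlen)
    exact (hmem g).mp (hperm.mem_iff.mpr ((PySem.Set.mem_ofList _ _).mpr hg))
  · intro hcov
    have hsub2 : PySem.Set.ofList gems ⊆ ks := by
      intro g hg
      exact (hmem g).mpr (hcov g ((PySem.Set.mem_ofList _ _).mp hg))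
    have hsp2 := List.subperm_of_subset (PySem.Set.nodup_ofList gems) hsub2
    exact le_antisymm hsp2.length_le hsp.length_le

-- B's while-loop specification
lemma shrink_spec (gems p q : List String) (hq : gems = p ++ q) :
    ∀ (fuel : Nat) (counts : PySem.Dict String Int) (left : Nat),
    (∀ g, counts.getD g 0 = ((p.drop left).count g : Int)) →
    (∀ g ∈ p, g ∈ p.drop left) →
    left ≤ p.length →
    p.length - left ≤ fuel →
    (∀ g, (shrinkLoop gems fuel counts left).1.getD g 0 =
        ((p.drop (shrinkLoop gems fuel counts left).2).count g : Int)) ∧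
    (∀ g ∈ p, g ∈ p.drop (shrinkLoop gems fuel counts left).2) ∧
    (shrinkLoop gems fuel counts left).2 ≤ p.length ∧
    ¬ (1 < (shrinkLoop gems fuel counts left).1.getD
        (gems.getD (shrinkLoop gems fuel counts left).2 "") 0) ∧
    (∀ g, g ∈ (shrinkLoop gems fuel counts left).1.keys ↔ g ∈ counts.keys) ∧
    (counts.keys.Nodup → (shrinkLoop gems fuel counts left).1.keys.Nodup) := by
  intro fuel
  induction fuel with
  | zero =>
    intro counts left h1 h2 h3 h4
    -- fuel 0 forces left = p.length: the loop test is false anyway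
    have hl : left = p.length := by omega
    subst hl
    refine ⟨h1, h2, le_refl _, ?_, fun g => Iff.rfl, fun h => h⟩
    simp only [shrinkLoop]
    rw [h1]
    simp
  | succ fuel ih =>
    intro counts left h1 h2 h3 h4
    by_cases hstop : 1 < counts.getD (gems.getD left "") 0
    · -- loop body runs: left < p.length, head has count > 1
      have hlt : left < p.length := by
        by_contra hge
        have hl : left = p.length := by omega
        subst hl
        rw [h1, List.drop_length] at hstop
        simp at hstop
      have hgg : gems.getD left "" = p.getD left "" := by
        subst hq
        rw [List.getD_eq_getElem _ _ (by simp; omega : left < (p ++ q).length),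
            List.getD_eq_getElem _ _ hlt, List.getElem_append_left hlt]
      set g0 := p.getD left "" with hg0
      have hdrop : p.drop left = p[left]'hlt :: p.drop (left + 1) := List.drop_eq_getElem_cons hlt
      have hg0e : p[left]'hlt = g0 := by rw [hg0, List.getD_eq_getElem _ _ hlt]
      have hcount : (p.drop left).count g0 = (p.drop (left + 1)).count g0 + 1 := by
        rw [hdrop, hg0e, List.count_cons_self]
      have hpos : 0 < (p.drop (left + 1)).count g0 := by
        have := h1 g0
        rw [hgg] at hstop
        omega
      have hstep : shrinkLoop gems (fuel + 1) counts left =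
          shrinkLoop gems fuel (counts.modify (gems.getD left "") 0 (· - 1)) (left + 1) := by
        simp only [shrinkLoop]
        rw [if_pos hstop]
      rw [hstep]
      have h1' : ∀ g, (counts.modify (gems.getD left "") 0 (· - 1)).getD g 0 =
          ((p.drop (left + 1)).count g : Int) := by
        intro g
        rw [hgg, PySem.Dict.getD_modify]
        split_ifs with hgeq
        · subst hgeq; rw [h1, hcount]; push_cast; ring
        · rw [h1]
          congr 1
          rw [hdrop, hg0e, List.count_cons_of_ne (Ne.symm hgeq)]
      have h2' : ∀ g ∈ p, g ∈ p.drop (left + 1) := by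
        intro g hg
        have hmem := h2 g hg
        rw [hdrop, hg0e] at hmem
        rcases List.mem_cons.mp hmem with h | h
        · subst h
          exact List.count_pos_iff.mp hpos
        · exact h
      obtain ⟨c1, c2, c3, c4, c5, c6⟩ := ih (counts.modify (gems.getD left "") 0 (· - 1))
        (left + 1) h1' h2' (by omega) (by omega)
      refine ⟨c1, c2, c3, c4, ?_, ?_⟩
      · intro g
        -- the modified key was already a key (its count is positive), so no key is added
        have hck : counts.contains (gems.getD left "") = true := by
          by_contra hnc
          have h0 : counts.getD (gems.getD left "") 0 = 0 :=
            PySem.Dict.getD_of_not_contains counts 0 (by simpa using hnc)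
          omega
        rw [c5 g, ← PySem.Dict.contains_iff_mem_keys, ← PySem.Dict.contains_iff_mem_keys,
            PySem.Dict.contains_modify]
        constructor
        · intro h
          rcases (Bool.or_eq_true _ _).mp h with h | h
          · rw [beq_iff_eq.mp h]; exact hck
          · exact h
        · intro h
          rw [h, Bool.or_true]
      · intro hnod
        apply c6
        rw [PySem.Dict.keys_modify]
        exact PySem.Dict.nodup_keys_insert _ _ _ hnod
    · -- loop stops
      have hstep : shrinkLoop gems (fuel + 1) counts left = (counts, left) := by
        simp only [shrinkLoop]
        rw [if_neg hstop]
      rw [hstep]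
      exact ⟨h1, h2, h3, hstop, fun g => Iff.rfl, fun h => h⟩

-- proof-side names for the two loop bodies (identical to the lambdas in the ports)
def stepA (target : Int) (st : List Int × PySem.Dict String Int × Int × Bool × Option Int)
    (gem : String) : List Int × PySem.Dict String Int × Int × Bool × Option Int :=
  let answer := st.1
  let cnt := st.2.2.1 + 1
  let d := st.2.1.insert gem cnt
  let check := if !st.2.2.2.1 && target == (d.keys.length : Int) then true else st.2.2.2.1
  if check then
    if (match answer with
        | a0 :: a1 :: _ => decide (a0 < d.getD gem 0 ∧ d.getD gem 0 < a1)
        | _ => false) then (answer, d, cnt, check, st.2.2.2.2)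
    else
      let maxv := (PySem.List.max? d.values (fun v => v)).getD 0
      let minv := (PySem.List.min? d.values (fun v => v)).getD 0
      match st.2.2.2.2 with
      | none => ([minv, maxv], d, cnt, check, some (maxv - minv))
      | some L =>
        if maxv - minv < L then ([minv, maxv], d, cnt, check, some (maxv - minv))
        else (answer, d, cnt, check, some L)
  else (answer, d, cnt, check, st.2.2.2.2)

def stepB (gems : List String) (kinds : Nat)
    (st : PySem.Dict String Int × Nat × List Int × Option Int) (p : Int × String) :
    PySem.Dict String Int × Nat × List Int × Option Int :=
  let counts := st.1.modify p.2 0 (· + 1)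
  let left := st.2.1
  if counts.size = kinds then
    let cl := shrinkLoop gems gems.length counts left
    let newLen : Int := p.1 - (cl.2 : Int)
    match st.2.2.2 with
    | none => (cl.1, cl.2, [(cl.2 : Int) + 1, p.1 + 1], some newLen)
    | some L =>
      if newLen < L then (cl.1, cl.2, [(cl.2 : Int) + 1, p.1 + 1], some newLen)
      else (cl.1, cl.2, st.2.2.1, some L)
  else (counts, left, st.2.2.1, st.2.2.2)

def initA : List Int × PySem.Dict String Int × Int × Bool × Option Int :=
  ([], PySem.Dict.empty, 0, false, none)

def initB : PySem.Dict String Int × Nat × List Int × Option Int :=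
  (PySem.Dict.empty, 0, [], none)

-- the joint loop invariant relating A's state to B's state after a common prefix p
structure StInv (gems p : List String)
    (a : List Int × PySem.Dict String Int × Int × Bool × Option Int)
    (b : PySem.Dict String Int × Nat × List Int × Option Int) : Prop where
  cnt : a.2.2.1 = (p.length : Int)
  dchar : ∀ g v, a.2.1.get? g = some v ↔ ∃ i : Nat, v = (i : Int) + 1 ∧ IsLast p g i
  dnodup : a.2.1.keys.Nodup
  dkeys : ∀ g, g ∈ a.2.1.keys ↔ g ∈ p
  chk : a.2.2.2.1 = true ↔ Cov gems p
  cnts : ∀ g, b.1.getD g 0 = ((p.drop b.2.1).count g : Int)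
  cnodup : b.1.keys.Nodup
  ckeys : ∀ g, g ∈ b.1.keys ↔ g ∈ p
  window : ∀ g ∈ p, g ∈ p.drop b.2.1
  leftle : b.2.1 ≤ p.length
  ans : a.1 = b.2.2.1
  len : a.2.2.2.2 = b.2.2.2
  shape : (a.1 = [] ∧ a.2.2.2.2 = none) ∨ ∃ a0 a1, a.1 = [a0, a1] ∧ a1 ≤ (p.length : Int)

lemma step_inv (gems p q : List String) (x : String) (hq : gems = (p ++ [x]) ++ q)
    (a : List Int × PySem.Dict String Int × Int × Bool × Option Int)
    (b : PySem.Dict String Int × Nat × List Int × Option Int)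
    (hInv : StInv gems p a b) :
    StInv gems (p ++ [x])
      (stepA ((PySem.Set.ofList gems).length : Int) a x)
      (stepB gems (PySem.Set.ofList gems).length b ((p.length : Int), x)) := by
  obtain ⟨ans, d, cnt, chk, len⟩ := a
  obtain ⟨counts, left, best, blen⟩ := b
  have icnt : cnt = (p.length : Int) := hInv.cnt
  have idchar : ∀ g v, d.get? g = some v ↔ ∃ i : Nat, v = (i : Int) + 1 ∧ IsLast p g i := hInv.dchar
  have idnodup : d.keys.Nodup := hInv.dnodup
  have idkeys : ∀ g, g ∈ d.keys ↔ g ∈ p := hInv.dkeys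
  have ichk : chk = true ↔ Cov gems p := hInv.chk
  have icnts : ∀ g, counts.getD g 0 = ((p.drop left).count g : Int) := hInv.cnts
  have icnodup : counts.keys.Nodup := hInv.cnodup
  have ickeys : ∀ g, g ∈ counts.keys ↔ g ∈ p := hInv.ckeys
  have iwin : ∀ g ∈ p, g ∈ p.drop left := hInv.window
  have ileft : left ≤ p.length := hInv.leftle
  have ians : ans = best := hInv.ans
  have ilen : len = blen := hInv.len
  have ishape : (ans = [] ∧ len = none) ∨ ∃ a0 a1, ans = [a0, a1] ∧ a1 ≤ (p.length : Int) :=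
    hInv.shape
  subst icnt ians ilen
  have hpre : ∀ g ∈ p ++ [x], g ∈ gems := by
    intro g hg; rw [hq]; exact List.mem_append_left _ hg
  -- ==== the A side after this step ====
  have hd' : ∀ g v, (d.insert x ((p.length : Int) + 1)).get? g = some v ↔
      ∃ i : Nat, v = (i : Int) + 1 ∧ IsLast (p ++ [x]) g i := dchar_insert p x d idchar
  have hdk' : ∀ g, g ∈ (d.insert x ((p.length : Int) + 1)).keys ↔ g ∈ p ++ [x] := by
    intro g
    rw [PySem.Dict.mem_keys_insert, idkeys g]
    simp [List.mem_append, or_comm]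
  have hdn' : (d.insert x ((p.length : Int) + 1)).keys.Nodup :=
    PySem.Dict.nodup_keys_insert _ _ _ idnodup
  have hsizeA : (((PySem.Set.ofList gems).length : Int) ==
      ((d.insert x ((p.length : Int) + 1)).keys.length : Int)) = true ↔ Cov gems (p ++ [x]) := by
    rw [beq_iff_eq, Int.natCast_inj]
    exact cov_size gems (p ++ [x]) _ hdn' hdk' hpre
  have hbool : ∀ (c : Bool) (u v : Int),
      (if (!c && (u == v)) = true then true else c) = (c || (u == v)) := by
    intro c u v; cases c
    · cases h : (u == v) <;> simp
    · simp
  have hchk' : (chk || (((PySem.Set.ofList gems).length : Int) ==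
      ((d.insert x ((p.length : Int) + 1)).keys.length : Int))) = true ↔ Cov gems (p ++ [x]) := by
    cases hc : chk
    · simpa using hsizeA
    · have hcov : Cov gems p := ichk.mp hc
      have hcov' : Cov gems (p ++ [x]) := fun g hg => List.mem_append_left _ (hcov g hg)
      simp [hcov']
  -- ==== the B side after this step ====
  have hdropx : (p ++ [x]).drop left = p.drop left ++ [x] :=
    List.drop_append_of_le_length ileft
  have hc1 : ∀ g, (counts.modify x 0 (· + 1)).getD g 0 =
      (((p ++ [x]).drop left).count g : Int) := by
    intro g
    rw [PySem.Dict.getD_modify, hdropx, List.count_append]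
    split_ifs with hgx
    · subst hgx
      rw [icnts]
      simp
    · rw [icnts]
      have : [x].count g = 0 := List.count_eq_zero.mpr (by simp [hgx])
      rw [this]
      push_cast; ring
  have hwin' : ∀ g ∈ p ++ [x], g ∈ (p ++ [x]).drop left := by
    intro g hg
    rw [hdropx]
    rcases List.mem_append.mp hg with h | h
    · exact List.mem_append_left _ (iwin g h)
    · exact List.mem_append_right _ h
  have hkB : ∀ g, g ∈ (counts.modify x 0 (· + 1)).keys ↔ g ∈ p ++ [x] := by
    intro g
    rw [PySem.Dict.keys_modify, PySem.Dict.mem_keys_insert, ickeys g]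
    simp [List.mem_append, or_comm]
  have hnB : (counts.modify x 0 (· + 1)).keys.Nodup := by
    rw [PySem.Dict.keys_modify]
    exact PySem.Dict.nodup_keys_insert _ _ _ icnodup
  have hszkeys : (counts.modify x 0 (· + 1)).size = (counts.modify x 0 (· + 1)).keys.length := by
    simp [PySem.Dict.size, PySem.Dict.keys]
  have hsizeB : ((counts.modify x 0 (· + 1)).size = (PySem.Set.ofList gems).length) ↔
      Cov gems (p ++ [x]) := by
    rw [hszkeys, eq_comm]
    exact cov_size gems (p ++ [x]) _ hnB hkB hpre
  -- ==== case split on coverage ====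
  by_cases hcov : Cov gems (p ++ [x])
  · -- covered: A scans min/max of the dict, B shrinks the window; both update the best
    -- B's while loop
    have hlen' : (p ++ [x]).length ≤ gems.length := by rw [hq]; simp
    obtain ⟨c1, c2, c3, c4, c5, c6⟩ :=
      shrink_spec gems (p ++ [x]) q hq gems.length (counts.modify x 0 (· + 1)) left
        hc1 hwin' (by simp; omega) (by omega)
    set cl := shrinkLoop gems gems.length (counts.modify x 0 (· + 1)) left with hcl
    have hxmem : x ∈ (p ++ [x]).drop cl.2 := c2 x (by simp)
    have hlt : cl.2 < (p ++ [x]).length := by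
      by_contra hge
      rw [List.drop_eq_nil_of_le (by omega)] at hxmem
      simp at hxmem
    have htight : TightL (p ++ [x]) cl.2 := by
      refine ⟨hlt, c2, ?_⟩
      have hgg : gems.getD cl.2 "" = (p ++ [x]).getD cl.2 "" := by
        rw [hq, List.getD_eq_getElem _ _ (by simp only [List.length_append, List.length_singleton] at hlt ⊢; omega : cl.2 < ((p ++ [x]) ++ q).length),
            List.getD_eq_getElem _ _ hlt, List.getElem_append_left hlt]
      have hge : (p ++ [x]).getD cl.2 "" = (p ++ [x])[cl.2]'hlt :=
        List.getD_eq_getElem _ _ hlt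
      have hdc : (p ++ [x]).drop cl.2 =
          (p ++ [x]).getD cl.2 "" :: (p ++ [x]).drop (cl.2 + 1) := by
        rw [hge]; exact List.drop_eq_getElem_cons hlt
      have hcnt := c1 ((p ++ [x]).getD cl.2 "")
      rw [hgg] at c4
      rw [hdc, List.count_cons_self] at hcnt
      intro hmem
      have hpos : 0 < ((p ++ [x]).drop (cl.2 + 1)).count ((p ++ [x]).getD cl.2 "") :=
        List.count_pos_iff.mpr hmem
      omega
    -- A's min/max over the dict values
    have hmax : (PySem.List.max? (d.insert x ((p.length : Int) + 1)).values (fun v => v)).getD 0 =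
        (((p ++ [x]).length : Nat) : Int) := maxv_eq (p ++ [x]) _ hdn' hd' (by simp)
    have hmin : (PySem.List.min? (d.insert x ((p.length : Int) + 1)).values (fun v => v)).getD 0 =
        (cl.2 : Int) + 1 := minv_eq (p ++ [x]) _ hdn' hd' cl.2 htight
    have hmax' : (((p ++ [x]).length : Nat) : Int) = (p.length : Int) + 1 := by simp
    -- now reduce both steps
    have harith : (p.length : Int) + 1 - ((cl.2 : Int) + 1) = (p.length : Int) - (cl.2 : Int) := by
      ring
    have hkeysFin : ∀ g, g ∈ cl.1.keys ↔ g ∈ p ++ [x] := fun g => (c5 g).trans (hkB g)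
    rcases ishape with ⟨h1, h2⟩ | ⟨a0, a1, h1, h2⟩ <;> subst h1
    · subst h2
      simp only [stepA, stepB]
      rw [hbool]
      simp only [hchk'.mpr hcov, hsizeB.mpr hcov, ← hcl, hmin, hmax, hmax', if_true,
        Bool.false_eq_true, if_false, harith]
      exact ⟨by simp, hd', hdn', hdk', by simp [hcov], c1, c6 hnB, hkeysFin, c2, c3, rfl, rfl,
        Or.inr ⟨(cl.2 : Int) + 1, (p.length : Int) + 1, rfl, by simp⟩⟩
    · simp only [stepA, stepB]
      rw [hbool]
      simp only [hchk'.mpr hcov, hsizeB.mpr hcov, ← hcl, hmin, hmax, hmax', if_true,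
        PySem.Dict.getD_insert_self, harith]
      have hgf : decide (a0 < (p.length : Int) + 1 ∧ (p.length : Int) + 1 < a1) = false := by
        simp only [decide_eq_false_iff_not, not_and]
        intro _
        omega
      simp only [hgf, Bool.false_eq_true, if_false]
      rcases len with _ | Lv
      · exact ⟨by simp, hd', hdn', hdk', by simp [hcov], c1, c6 hnB, hkeysFin, c2, c3, rfl, rfl,
          Or.inr ⟨(cl.2 : Int) + 1, (p.length : Int) + 1, rfl, by simp⟩⟩
      · simp only []
        split_ifs with hless
        · exact ⟨by simp, hd', hdn', hdk', by simp [hcov], c1, c6 hnB, hkeysFin, c2, c3, rfl, rfl,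
            Or.inr ⟨(cl.2 : Int) + 1, (p.length : Int) + 1, rfl, by simp⟩⟩
        · exact ⟨by simp, hd', hdn', hdk', by simp [hcov], c1, c6 hnB, hkeysFin, c2, c3, rfl, rfl,
            Or.inr ⟨a0, a1, rfl, by simp; omega⟩⟩
  · -- not yet covered: neither side touches the answer
    simp only [stepA, stepB]
    rw [hbool]
    have hfalse : (chk || (((PySem.Set.ofList gems).length : Int) ==
        ((d.insert x ((p.length : Int) + 1)).keys.length : Int))) = false := by
      rw [← Bool.not_eq_true]; intro h; exact hcov (hchk'.mp h)
    rw [hfalse]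
    simp only [Bool.false_eq_true, if_false, if_neg (fun h => hcov (hsizeB.mp h))]
    refine ⟨by simp, hd', hdn', hdk', ?_, hc1, hnB, hkB, hwin', by simp; omega, rfl, rfl, ?_⟩
    · exact iff_of_false (by simp) hcov
    · rcases ishape with ⟨h1, h2⟩ | ⟨a0, a1, h1, h2⟩
      · exact Or.inl ⟨h1, h2⟩
      · exact Or.inr ⟨a0, a1, h1, by simp; omega⟩

lemma main_inv (gems : List String) (hne : gems ≠ []) (p : List String) :
    (∃ q, gems = p ++ q) →
    StInv gems p (p.foldl (stepA ((PySem.Set.ofList gems).length : Int)) initA)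
      ((PySem.List.enumerate p).foldl (stepB gems (PySem.Set.ofList gems).length) initB) := by
  induction p using List.reverseRecOn with
  | nil =>
    intro _
    refine ⟨rfl, ?_, ?_, ?_, ?_, ?_, ?_, ?_, ?_, ?_, rfl, rfl, Or.inl ⟨rfl, rfl⟩⟩
    · intro g v
      simp [initA, PySem.Dict.get?_empty, IsLast]
    · simp [initA, PySem.Dict.keys_empty]
    · intro g
      simp [initA, PySem.Dict.keys_empty]
    · constructor
      · intro h; cases h
      · intro hcov
        exfalso
        obtain ⟨g, hg⟩ := List.exists_mem_of_ne_nil gems hne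
        exact List.not_mem_nil (hcov g hg)
    · intro g
      simp [initB, PySem.Dict.getD_empty]
    · simp [initB, PySem.Dict.keys_empty]
    · intro g
      simp [initB, PySem.Dict.keys_empty]
    · intro g hg; cases hg
    · simp [initB]
  | append_singleton p x ih =>
    rintro ⟨q, hq⟩
    have IH := ih ⟨x :: q, by simpa using hq⟩
    have henum : PySem.List.enumerate (p ++ [x]) 0 =
        PySem.List.enumerate p 0 ++ [((p.length : Int), x)] := by
      rw [PySem.List.enumerate_append]
      simp [PySem.List.enumerate_cons, PySem.List.enumerate_nil]
    rw [List.foldl_append, henum, List.foldl_append, List.foldl_cons, List.foldl_nil]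
    exact step_inv gems p q x hq _ _ IH

-- ===== VERDICT (by name: the statement is the Claim_ definition above) =====
theorem solution_spec : Claim_equal_solution := by
  unfold Claim_equal_solution
  intro gems _
  unfold Spec_solution
  by_cases hne : gems = []
  · subst hne; rfl
  · have h := main_inv gems hne gems ⟨[], by simp⟩
    have h1 : solution gems =
        (gems.foldl (stepA ((PySem.Set.ofList gems).length : Int)) initA).1 := rfl
    have h2 : solution_alt gems =
        ((PySem.List.enumerate gems).foldl
          (stepB gems (PySem.Set.ofList gems).length) initB).2.2.1 := rfl
    rw [h1, h2, h.ans]
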